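-- pv_equiv track=rewrite | github.com/rivillasm/python_code | python_051_Empty_rows_shift.py | find_best_shift
-- ===== SOURCE A (Python) =====
-- def find_best_shift(series1, series2):
--     """  find the shift between two series """
--     min_diff = float('inf')
--     best_shift = None
--
--     # Iterate over possible shift values
--     for shift in range(len(series1)):
--         # Calculate sum of absolute differences for this shift
--         diff_sum = sum(abs(series1[i] - series2[(i + shift) % len(series2)]) for i in range(len(series1)))
--
--         # Update best shift if this shift has lower sum of absolute differences
--         if diff_sum < min_diff:
--             min_diff = diff_sum
--             best_shift = shift
--
--     return best_shift
-- ===== SOURCE B (Python) =====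
-- def find_best_shift(series1, series2):
--     """  find the shift between two series """
--     n = len(series1)
--     # One pass over positions i: accumulate every shift's sum of absolute
--     # differences into one array (loop nest interchanged w.r.t. the obvious
--     # per-shift computation), then scan that array for the first minimum.
--     diff_sums = [0] * n
--     for i in range(n):
--         x = series1[i]
--         for shift in range(n):
--             diff_sums[shift] += abs(x - series2[(i + shift) % len(series2)])
--     min_diff = float('inf')
--     best_shift = None
--     for shift in range(n):
--         if diff_sums[shift] < min_diff:
--             min_diff = diff_sums[shift]
--             best_shift = shift
--     return best_shift
-- ===== Notes on version B (the rewrite author's own statement) =====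
-- stated objective: alternative
-- what changed: Loop nest interchanged: B makes one pass over positions i, accumulating every shift's sum of absolute differences into one diff_sums array, then scans that array once for the first index achieving the minimum, instead of A's per-shift inner pass with a running best.
-- outside the precondition, e.g. on find_best_shift([], [1]): A returns None, B returns None; on find_best_shift([1], []): A raises ZeroDivisionError, B raises ZeroDivisionError
import Mathlib
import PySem

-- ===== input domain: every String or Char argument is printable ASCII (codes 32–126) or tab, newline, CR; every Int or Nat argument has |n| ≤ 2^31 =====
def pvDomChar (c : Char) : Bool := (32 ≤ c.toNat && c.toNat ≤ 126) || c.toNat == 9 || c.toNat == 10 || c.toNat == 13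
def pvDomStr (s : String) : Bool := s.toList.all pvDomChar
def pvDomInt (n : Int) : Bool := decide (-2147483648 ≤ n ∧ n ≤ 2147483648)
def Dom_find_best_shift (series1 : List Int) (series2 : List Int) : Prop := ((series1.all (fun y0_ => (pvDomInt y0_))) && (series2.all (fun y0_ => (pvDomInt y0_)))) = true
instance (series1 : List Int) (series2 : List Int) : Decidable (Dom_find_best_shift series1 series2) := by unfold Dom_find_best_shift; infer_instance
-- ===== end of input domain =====

-- B interchanges A's loop nest (one pass over positions accumulating all shifts' sums
-- into an array, then a first-minimum scan); objective: alternative decomposition, same cost.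

-- ===== PORT A =====
-- 'min_diff = inf' / 'best_shift = None' are the state (none, none); Python returns
-- best_shift, which is None (not an int) when series1 is empty — Pre_ excludes that,
-- the port returns the placeholder 0 there.
def find_best_shift (series1 : List Int) (series2 : List Int) : Int :=
  let st := (PySem.List.pyRange 0 series1.length 1).foldl
    (fun (st : Option Int × Option Int) shift =>
      let diff_sum := (PySem.List.pyRange 0 series1.length 1).foldl
        (fun acc i => acc + |PySem.List.pyGetD series1 i 0 -
            PySem.List.pyGetD series2 (PySem.Int.mod (i + shift) series2.length) 0|) 0
      match st.1 with
      | none => (some diff_sum, some shift)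
      | some m => if diff_sum < m then (some diff_sum, some shift) else st)
    (none, none)
  st.2.getD 0

-- ===== PORT B =====
-- transliteration of Source B: outer loop over i building diff_sums in place, then the
-- first-minimum scan; returns the placeholder 0 where Source B returns None (empty series1).
def find_best_shift_alt (series1 : List Int) (series2 : List Int) : Int :=
  let n := series1.length
  let diff_sums := (PySem.List.pyRange 0 n 1).foldl
    (fun sums i =>
      let x := PySem.List.pyGetD series1 i 0
      (PySem.List.pyRange 0 n 1).foldl
        (fun s shift => s.set shift.toNat
          (PySem.List.pyGetD s shift 0 +
            |x - PySem.List.pyGetD series2 (PySem.Int.mod (i + shift) series2.length) 0|)) sums)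
    (List.replicate n 0)
  let st := (PySem.List.pyRange 0 n 1).foldl
    (fun (st : Option Int × Option Int) shift =>
      let d := PySem.List.pyGetD diff_sums shift 0
      match st.1 with
      | none => (some d, some shift)
      | some m => if d < m then (some d, some shift) else st)
    (none, none)
  st.2.getD 0

-- ===== PRECONDITION & SPEC =====
-- Pre_ excludes empty series1, where Python A returns None (not an int), and empty
-- series2 with nonempty series1, where Python A raises ZeroDivisionError.
def Pre_find_best_shift (series1 : List Int) (series2 : List Int) : Prop :=
  series1 ≠ [] ∧ series2 ≠ []
instance (series1 : List Int) (series2 : List Int) : Decidable (Pre_find_best_shift series1 series2) := by unfold Pre_find_best_shift; infer_instance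
def pvWitness_find_best_shift : List Int × List Int := ([1, 2, 3], [3, 1, 2])

def Spec_find_best_shift (series1 : List Int) (series2 : List Int) (out : Int) : Prop := out = find_best_shift_alt series1 series2
instance (series1 : List Int) (series2 : List Int) (out : Int) : Decidable (Spec_find_best_shift series1 series2 out) := by unfold Spec_find_best_shift; infer_instance

-- ===== CLAIM (what is proved, stated in full; the proofs are below) =====
def Claim_equal_find_best_shift : Prop := ∀ (series1 : List Int) (series2 : List Int), Dom_find_best_shift series1 series2 → Pre_find_best_shift series1 series2 → Spec_find_best_shift series1 series2 (find_best_shift series1 series2)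

-- ===== LEMMAS AND PROOFS =====

-- the (i, shift) term both programs add: |series1[i] - series2[(i+shift) % len(series2)]|
def fbsT (s1 s2 : List Int) (i k : Nat) : Int :=
  |s1.getD i 0 - s2.getD ((i + k) % s2.length) 0|

-- A's diff_sum for shift k, summed over i < m in loop order
def fbsSum (s1 s2 : List Int) (m k : Nat) : Int :=
  (List.range m).foldl (fun acc i => acc + fbsT s1 s2 i k) 0

-- the shared first-strict-minimum scan over f 0, …, f (n-1)
def fbsScan (f : Nat → Int) (n : Nat) : Option Int × Option Int :=
  (List.range n).foldl
    (fun st k =>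
      match st.1 with
      | none => (some (f k), some (k : Int))
      | some m => if f k < m then (some (f k), some (k : Int)) else st)
    (none, none)

lemma fbsSum_succ (s1 s2 : List Int) (m k : Nat) :
    fbsSum s1 s2 (m + 1) k = fbsSum s1 s2 m k + fbsT s1 s2 m k := by
  simp [fbsSum, List.range_succ]

-- a fold that sets index j to f j (current value) for j = 0,…,k-1
lemma foldl_set_prefix (f : Nat → Int → Int) (L : List Int) :
    ∀ k, k ≤ L.length →
      (List.range k).foldl (fun s j => s.set j (f j (s.getD j 0))) L
        = L.mapIdx (fun j v => if j < k then f j v else v) := by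
  intro k
  induction k with
  | zero =>
    intro _
    refine List.ext_getElem (by simp) ?_
    intro i h1 h2
    simp [List.getElem_mapIdx]
  | succ k ih =>
    intro hk
    rw [List.range_succ, List.foldl_append, ih (by omega)]
    refine List.ext_getElem (by simp) ?_
    intro i h1 h2
    have hkL : k < L.length := by omega
    have hgd : (L.mapIdx (fun j v => if j < k then f j v else v)).getD k 0
        = L[k] := by
      rw [List.getD_eq_getElem _ _ (by simpa using hkL), List.getElem_mapIdx]
      simp
    simp only [List.foldl_cons, List.foldl_nil, hgd]
    rw [List.getElem_set]
    simp only [List.getElem_mapIdx]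
    split_ifs <;> simp_all <;> omega

-- one row update (inner loop of B) on a list given as a map over range n
lemma fbsRow (f : Nat → Int) (g : Nat → Int) (n : Nat) :
    (List.range n).foldl (fun s k => s.set k (s.getD k 0 + f k)) ((List.range n).map g)
      = (List.range n).map (fun k => g k + f k) := by
  have h := foldl_set_prefix (fun k v => v + f k) ((List.range n).map g) n (by simp)
  rw [h]
  refine List.ext_getElem (by simp) ?_
  intro i h1 h2
  have hi : i < n := by simpa using h2
  simp_all [List.getElem_mapIdx]

-- the outer loop of B computes exactly A's per-shift sums
lemma fbsSums_eq (s1 s2 : List Int) (n : Nat) :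
    ∀ m, (List.range m).foldl
        (fun sums i => (List.range n).foldl
          (fun s k => s.set k (s.getD k 0 + fbsT s1 s2 i k)) sums)
        (List.replicate n 0)
      = (List.range n).map (fun k => fbsSum s1 s2 m k) := by
  intro m
  induction m with
  | zero =>
    simp only [List.range_zero, List.foldl_nil]
    refine List.ext_getElem (by simp) ?_
    intro i h1 h2
    simp [fbsSum]
  | succ m ih =>
    rw [List.range_succ, List.foldl_append, ih]
    simp only [List.foldl_cons, List.foldl_nil]
    rw [fbsRow]
    refine List.ext_getElem (by simp) ?_
    intro i h1 h2
    simp [fbsSum_succ]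

lemma find_best_shift_eq_scan (s1 s2 : List Int) :
    find_best_shift s1 s2
      = (fbsScan (fbsSum s1 s2 s1.length) s1.length).2.getD 0 := by
  unfold find_best_shift fbsScan fbsSum fbsT
  rw [PySem.List.pyRange_one]
  simp only [List.foldl_map, zero_add, Int.sub_zero, Int.toNat_natCast,
    ← Int.natCast_add, PySem.Int.mod_natCast, PySem.List.pyGetD_natCast]

lemma find_best_shift_alt_eq_scan (s1 s2 : List Int) :
    find_best_shift_alt s1 s2
      = (fbsScan (fbsSum s1 s2 s1.length) s1.length).2.getD 0 := by
  simp only [find_best_shift_alt, PySem.List.pyRange_one]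
  simp only [List.foldl_map, zero_add, Int.sub_zero, Int.toNat_natCast,
    ← Int.natCast_add, PySem.Int.mod_natCast, PySem.List.pyGetD_natCast]
  rw [show (fun (sums : List Int) (i : Nat) =>
        (List.range s1.length).foldl
          (fun s k => s.set k (s.getD k 0 + |s1.getD i 0 - s2.getD ((i + k) % s2.length) 0|)) sums)
      = (fun sums i => (List.range s1.length).foldl
          (fun s k => s.set k (s.getD k 0 + fbsT s1 s2 i k)) sums) from rfl]
  rw [fbsSums_eq s1 s2 s1.length s1.length]
  rw [PySem.List.foldl_congr_mem _ _
    (fun (st : Option Int × Option Int) k =>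
      match st.1 with
      | none => (some (fbsSum s1 s2 s1.length k), some (k : Int))
      | some m => if fbsSum s1 s2 s1.length k < m then
          (some (fbsSum s1 s2 s1.length k), some (k : Int)) else st)
    (none, none) ?_]
  · rfl
  · intro acc x hx
    rw [List.mem_range] at hx
    rw [List.getD_eq_getElem _ _ (by simpa using hx)]
    simp [List.getElem_map]

-- ===== VERDICT (by name: the statement is the Claim_ definition above) =====
theorem find_best_shift_spec : Claim_equal_find_best_shift := by
  intro s1 s2 _ _
  unfold Spec_find_best_shift
  rw [find_best_shift_eq_scan, find_best_shift_alt_eq_scan]
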